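-- pv_equiv track=rewrite | github.com/limit5/OmniSight-Productizer | backend/intelligence_mitigation.py | map_alerts_to_level
-- ===== SOURCE A (Python) =====
-- from typing import Literal
--
-- MitigationLevel = Literal["calibrate", "route", "contain"]
--
-- def map_alerts_to_level(alerts: list[tuple[str, str, str]]) -> MitigationLevel | None:
--     """Reduce a list of (level, dim, reason) alerts to a single
--     mitigation level. None means no action needed.
--
--     Rules (most-severe wins):
--       * any "critical" alert                → "route"
--       * any "warning"                       → "calibrate"
--       * empty                               → None
--
--     "contain" is NEVER produced from this single call — escalation to
--     L3 is only allowed in `propose_for_agent` when an L2 proposal is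
--     already open (i.e. operator approved a switch_model and we're
--     STILL drifting).
--     """
--     if not alerts:
--         return None
--     if any(lvl == "critical" for lvl, _, _ in alerts):
--         return "route"
--     if any(lvl == "warning" for lvl, _, _ in alerts):
--         return "calibrate"
--     return None
-- ===== SOURCE B (Python) =====
-- def map_alerts_to_level(alerts):
--     rank = {"critical": 2, "warning": 1}
--     best = max((rank.get(lvl, 0) for lvl, _, _ in alerts), default=0)
--     return {2: "route", 1: "calibrate", 0: None}[best]
-- ===== Notes on version B (the rewrite author's own statement) =====
-- stated objective: alternative
-- what changed: Replaces the two sequential short-circuiting any-scans plus emptiness guard with a single severity-maximizing fold over numeric ranks and a table lookup back to a level.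
import Mathlib
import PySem

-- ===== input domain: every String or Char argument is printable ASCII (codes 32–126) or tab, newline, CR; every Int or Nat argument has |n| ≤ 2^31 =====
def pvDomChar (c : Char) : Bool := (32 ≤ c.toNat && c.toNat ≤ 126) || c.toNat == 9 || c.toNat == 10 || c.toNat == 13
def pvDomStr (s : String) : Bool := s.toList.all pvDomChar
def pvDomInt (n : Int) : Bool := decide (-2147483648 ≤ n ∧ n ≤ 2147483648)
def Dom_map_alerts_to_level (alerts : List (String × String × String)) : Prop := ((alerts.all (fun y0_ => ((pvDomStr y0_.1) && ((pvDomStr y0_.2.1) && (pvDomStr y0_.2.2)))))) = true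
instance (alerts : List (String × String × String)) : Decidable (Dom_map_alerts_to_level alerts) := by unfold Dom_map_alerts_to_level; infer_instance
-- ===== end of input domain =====

-- B replaces A's two short-circuit any-scans and emptiness guard with one severity-maximizing
-- fold over numeric ranks plus a table lookup (objective: alternative decomposition).

-- ===== PORT A =====
def map_alerts_to_level (alerts : List (String × String × String)) : Option String :=
  if alerts = [] then none
  else if alerts.any (fun p => p.1 == "critical") then some "route"
  else if alerts.any (fun p => p.1 == "warning") then some "calibrate"
  else none

-- ===== PORT B =====
-- rank = {"critical": 2, "warning": 1}
def pvRankTable : PySem.Dict String Int :=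
  PySem.Dict.ofList [("critical", 2), ("warning", 1)]

-- {2: "route", 1: "calibrate", 0: None}
def pvLevelTable : PySem.Dict Int (Option String) :=
  PySem.Dict.ofList [(2, some "route"), (1, some "calibrate"), (0, none)]

def map_alerts_to_level_alt (alerts : List (String × String × String)) : Option String :=
  -- best = max((rank.get(lvl, 0) for lvl, _, _ in alerts), default=0)
  let best : Int := alerts.foldl (fun acc p => max acc (pvRankTable.getD p.1 0)) 0
  -- {...}[best]; indexing always succeeds here since best ∈ {0,1,2}, so getD is exact
  pvLevelTable.getD best none

-- ===== PRECONDITION & SPEC =====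
def Spec_map_alerts_to_level (alerts : List (String × String × String)) (out : Option String) : Prop := out = map_alerts_to_level_alt alerts
instance (alerts : List (String × String × String)) (out : Option String) : Decidable (Spec_map_alerts_to_level alerts out) := by unfold Spec_map_alerts_to_level; infer_instance

-- ===== CLAIM (what is proved, stated in full; the proofs are below) =====
def Claim_equal_map_alerts_to_level : Prop := ∀ (alerts : List (String × String × String)), Dom_map_alerts_to_level alerts → Spec_map_alerts_to_level alerts (map_alerts_to_level alerts)

-- ===== LEMMAS AND PROOFS =====

-- characterisation of B's fold, with a generalized accumulator
theorem pv_rank_val (s : String) :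
    pvRankTable.getD s 0 = if s == "critical" then 2 else if s == "warning" then 1 else 0 := by
  have hmk : pvRankTable = PySem.Dict.mk [("critical", 2), ("warning", 1)] := by decide
  rw [hmk]
  simp only [PySem.Dict.getD_eq_get?_getD, PySem.Dict.get?_mk_cons]
  by_cases hc : s = "critical"
  · subst hc; simp
  · by_cases hw : s = "warning"
    · subst hw; simp
    · simp [Ne.symm hc, Ne.symm hw, hc, hw, PySem.Dict.get?]
theorem pv_fold_char (alerts : List (String × String × String)) : ∀ (a : Int), 0 ≤ a →
    alerts.foldl (fun acc p => max acc (pvRankTable.getD p.1 0)) a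
      = max a (if alerts.any (fun p => p.1 == "critical") then 2
               else if alerts.any (fun p => p.1 == "warning") then 1 else 0) := by
  induction alerts with
  | nil => intro a ha; simp; omega
  | cons p xs ih =>
    intro a ha
    have hr := pv_rank_val p.1
    rw [List.foldl_cons, List.any_cons, List.any_cons]
    generalize pvRankTable.getD p.1 0 = r at hr ⊢
    have h0 : (0 : Int) ≤ max a r := le_max_of_le_left ha
    rw [ih _ h0]
    by_cases hc : p.1 == "critical" <;>
      by_cases hw : p.1 == "warning" <;>
        simp [hc, hw] at hr ⊢ <;> subst hr <;> split_ifs <;> first | omega | simp_all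

theorem map_alerts_to_level_spec' (alerts : List (String × String × String)) :
    map_alerts_to_level alerts = map_alerts_to_level_alt alerts := by
  unfold map_alerts_to_level map_alerts_to_level_alt
  rw [pv_fold_char alerts 0 le_rfl]
  cases alerts with
  | nil => simp [pvLevelTable, PySem.Dict.getD]; decide
  | cons p xs =>
    simp only [List.any_cons]
    by_cases hc : (p.1 == "critical" || xs.any (fun p => p.1 == "critical")) = true <;>
      by_cases hw : (p.1 == "warning" || xs.any (fun p => p.1 == "warning")) = true <;>
        simp [hc, hw, pvLevelTable, PySem.Dict.getD] <;> decide

-- ===== VERDICT (by name: the statement is the Claim_ definition above) =====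
theorem map_alerts_to_level_spec : Claim_equal_map_alerts_to_level := by
  intro alerts _
  exact map_alerts_to_level_spec' alerts
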